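-- pv_equiv track=rewrite | github.com/tchamna/resulam-video-generator-pipeline | main_upgradev2_not_working_well.py | tag_bgs
-- ===== SOURCE A (Python) =====
-- def tag_bgs(rows, bgs):
--     idx, current = -1, bgs[0]
--     output = []
--     for r in sorted(rows, key=lambda x: x["id"]):
--         if r["english"].lower().startswith("chapter"):
--             idx = (idx + 1) % len(bgs)
--             current = bgs[idx]
--         rec = dict(r)
--         rec["bg"] = current
--         output.append(rec)
--     return output
-- ===== SOURCE B (Python) =====
-- def _is_chap(r):
--     return r["english"].lower().startswith("chapter")
--
--
-- def _paint(seg, bgs, bg, j):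
--     # find the next chapter row; emit the block before it in one go, then
--     # recurse on the remainder with the next cyclic colour
--     for i, r in enumerate(seg):
--         if _is_chap(r):
--             new = bgs[j % len(bgs)]
--             return ([{**x, "bg": bg} for x in seg[:i]]
--                     + [{**r, "bg": new}]
--                     + _paint(seg[i + 1:], bgs, new, j + 1))
--     return [{**x, "bg": bg} for x in seg]
--
--
-- def tag_bgs(rows, bgs):
--     srt = sorted(rows, key=lambda x: x["id"])
--     return _paint(srt, bgs, bgs[0], 0)
-- ===== Notes on version B (the rewrite author's own statement) =====
-- stated objective: alternative
-- what changed: Replaces A's single pass threading a mutable (idx, current) background state with a recursive segmentation: find the next chapter row, emit the whole preceding block with one colour in a single comprehension, and recurse on the remainder with the next cyclic colour derived from the segment ordinal.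
import Mathlib
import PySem

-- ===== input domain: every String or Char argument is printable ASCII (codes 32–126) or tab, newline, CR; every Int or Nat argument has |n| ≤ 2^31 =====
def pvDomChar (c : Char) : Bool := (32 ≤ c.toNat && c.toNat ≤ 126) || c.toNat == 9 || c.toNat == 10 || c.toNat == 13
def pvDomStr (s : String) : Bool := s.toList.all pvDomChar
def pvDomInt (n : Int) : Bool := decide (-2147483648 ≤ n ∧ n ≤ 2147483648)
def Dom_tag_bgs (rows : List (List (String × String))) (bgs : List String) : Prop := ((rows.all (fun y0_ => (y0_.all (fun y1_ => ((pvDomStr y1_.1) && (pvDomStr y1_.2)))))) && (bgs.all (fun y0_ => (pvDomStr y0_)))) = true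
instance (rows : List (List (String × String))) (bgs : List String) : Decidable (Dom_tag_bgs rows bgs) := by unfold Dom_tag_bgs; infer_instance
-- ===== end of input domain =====

-- B replaces A's single pass threading a mutable (idx, current) state with a recursive
-- segmentation: split the sorted rows at each chapter row, paint each whole block with
-- one colour taken from the segment's ordinal (alternative decomposition, same cost;
-- return-value equivalence only).

-- ===== PORT A =====
-- the single for-loop of A, threading (idx, current); output built row by row
def tagLoopA (bgs : List String) (idx : Int) (current : String) :
    List (List (String × String)) → List (List (String × String))
  | [] => []
  | r :: rest =>
    if PySem.Str.startswith (PySem.Str.lower ((PySem.Dict.mk r).getD "english" "")) "chapter" then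
      let idx' := PySem.Int.mod (idx + 1) (bgs.length : Int)
      let current' := PySem.List.pyGetD bgs idx' ""
      ((PySem.Dict.mk r).insert "bg" current').items :: tagLoopA bgs idx' current' rest
    else
      ((PySem.Dict.mk r).insert "bg" current).items :: tagLoopA bgs idx current rest

def tag_bgs (rows : List (List (String × String))) (bgs : List String) : List (List (String × String)) :=
  match bgs with
  | [] => []  -- bgs[0] raises IndexError in Python; excluded by Pre_tag_bgs
  | b0 :: bs =>
    tagLoopA (b0 :: bs) (-1) b0
      (PySem.List.sorted rows (fun x => (PySem.Dict.mk x).getD "id" ""))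

-- ===== PORT B =====
def chapFlagB (r : List (String × String)) : Bool :=
  PySem.Str.startswith (PySem.Str.lower ((PySem.Dict.mk r).getD "english" "")) "chapter"

-- {**x, "bg": bg} : copy of the row dict with "bg" set
def recWithB (bg : String) (x : List (String × String)) : List (String × String) :=
  ((PySem.Dict.mk x).insert "bg" bg).items

-- the enumerate-scan of _paint: (seg[:i], Some (seg[i], seg[i+1:])) at the first
-- chapter row, or (seg, none) when the loop falls through
def splitChapB : List (List (String × String)) →
    List (List (String × String)) × Option (List (String × String) × List (List (String × String)))
  | [] => ([], none)
  | r :: rest =>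
    if chapFlagB r then ([], some (r, rest))
    else
      let p := splitChapB rest
      (r :: p.1, p.2)

lemma splitChapB_rest_lt : ∀ (seg pre : List (List (String × String))) r rest,
    splitChapB seg = (pre, some (r, rest)) → rest.length < seg.length := by
  intro seg
  induction seg with
  | nil => intro pre r rest h; simp [splitChapB] at h
  | cons a l ih =>
    intro pre r rest h
    by_cases hc : chapFlagB a
    · simp [splitChapB, hc] at h
      obtain ⟨-, -, h3⟩ := h
      simp [← h3]
    · simp [splitChapB, hc] at h
      have := ih _ r rest (by rw [Prod.ext_iff]; exact ⟨rfl, h.2⟩)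
      simpa using Nat.lt_succ_of_lt this

-- _paint: emit the block before the next chapter in one go, then recurse on the
-- remainder with the next cyclic colour
def paintB (bgs : List String) (seg : List (List (String × String))) (bg : String) (j : Int) :
    List (List (String × String)) :=
  match h : splitChapB seg with
  | (_, none) => seg.map (recWithB bg)
  | (pre, some (r, rest)) =>
    let new := PySem.List.pyGetD bgs (PySem.Int.mod j (bgs.length : Int)) ""
    pre.map (recWithB bg) ++ recWithB new r :: paintB bgs rest new (j + 1)
termination_by seg.length
decreasing_by exact splitChapB_rest_lt seg pre r rest h

def tag_bgs_alt (rows : List (List (String × String))) (bgs : List String) : List (List (String × String)) :=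
  match bgs with
  | [] => []  -- bgs[0] raises IndexError in Python; excluded by Pre_tag_bgs
  | b0 :: bs =>
    paintB (b0 :: bs) (PySem.List.sorted rows (fun x => (PySem.Dict.mk x).getD "id" "")) b0 0

-- ===== PRECONDITION & SPEC =====
-- Pre_ excludes exactly the inputs where A raises: bgs = [] (IndexError on bgs[0]) and
-- rows missing an "id" or "english" key (KeyError).
def Pre_tag_bgs (rows : List (List (String × String))) (bgs : List String) : Prop :=
  bgs ≠ [] ∧ ∀ r ∈ rows, (PySem.Dict.mk r).contains "id" = true ∧ (PySem.Dict.mk r).contains "english" = true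
instance (rows : List (List (String × String))) (bgs : List String) : Decidable (Pre_tag_bgs rows bgs) := by
  unfold Pre_tag_bgs; infer_instance

def pvWitness_tag_bgs : (List (List (String × String))) × List String :=
  ([[("id", "2"), ("english", "Chapter 1")], [("id", "1"), ("english", "hello")]], ["bgA", "bgB"])

def Spec_tag_bgs (rows : List (List (String × String))) (bgs : List String) (out : List (List (String × String))) : Prop := out = tag_bgs_alt rows bgs
instance (rows : List (List (String × String))) (bgs : List String) (out : List (List (String × String))) : Decidable (Spec_tag_bgs rows bgs out) := by unfold Spec_tag_bgs; infer_instance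

-- ===== CLAIM (what is proved, stated in full; the proofs are below) =====
def Claim_equal_tag_bgs : Prop := ∀ (rows : List (List (String × String))) (bgs : List String), Dom_tag_bgs rows bgs → Pre_tag_bgs rows bgs → Spec_tag_bgs rows bgs (tag_bgs rows bgs)

-- ===== LEMMAS AND PROOFS =====

lemma emod_succ_emod (a n : Int) : (a % n + 1) % n = (a + 1) % n := by
  rw [Int.add_emod, Int.add_emod a 1, Int.emod_emod_of_dvd _ dvd_rfl]

-- non-dependent unfolding of the well-founded definition of paintB
lemma paintB_eq (bgs : List String) (seg : List (List (String × String))) (bg : String) (j : Int) :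
    paintB bgs seg bg j =
      match splitChapB seg with
      | (_, none) => seg.map (recWithB bg)
      | (pre, some (r, rest)) =>
        pre.map (recWithB bg) ++
          recWithB (PySem.List.pyGetD bgs (PySem.Int.mod j (bgs.length : Int)) "") r ::
            paintB bgs rest (PySem.List.pyGetD bgs (PySem.Int.mod j (bgs.length : Int)) "") (j + 1) := by
  rw [paintB]
  split
  · next fst h => rw [h]
  · next pre r rest h => rw [h]

-- one-step unfolding of paintB in the shape of a per-row recursion
lemma paintB_cons (bgs : List String) (r : List (String × String))
    (rest : List (List (String × String))) (bg : String) (j : Int) :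
    paintB bgs (r :: rest) bg j =
      if chapFlagB r then
        recWithB (PySem.List.pyGetD bgs (PySem.Int.mod j (bgs.length : Int)) "") r ::
          paintB bgs rest (PySem.List.pyGetD bgs (PySem.Int.mod j (bgs.length : Int)) "") (j + 1)
      else
        recWithB bg r :: paintB bgs rest bg j := by
  by_cases hc : chapFlagB r
  · rw [paintB_eq]
    simp [splitChapB, hc]
  · rcases hsplit : splitChapB rest with ⟨pre, opt⟩
    cases opt with
    | none =>
      rw [paintB_eq, if_neg hc, paintB_eq bgs rest]
      simp [splitChapB, hc, hsplit]
    | some pr =>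
      rw [paintB_eq, if_neg hc, paintB_eq bgs rest]
      simp [splitChapB, hc, hsplit]

-- loop invariant: after k chapter rows, A's state is
-- idx = (k-1) % n (or -1 if k = 0), current = bgs[(k-1) % n] (or bgs[0] if k = 0),
-- while B is about to paint the next segment with that same colour at ordinal j = k
lemma loop_eq (b0 : String) (bs : List String) (l : List (List (String × String))) :
    ∀ k : Int, 0 ≤ k →
    tagLoopA (b0 :: bs)
      (if k = 0 then -1 else PySem.Int.mod (k - 1) ((b0 :: bs).length : Int))
      (if k = 0 then b0 else PySem.List.pyGetD (b0 :: bs) (PySem.Int.mod (k - 1) ((b0 :: bs).length : Int)) "")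
      l
    = paintB (b0 :: bs) l
        (if k = 0 then b0 else PySem.List.pyGetD (b0 :: bs) (PySem.Int.mod (k - 1) ((b0 :: bs).length : Int)) "")
        k := by
  induction l with
  | nil => intro k hk; rw [tagLoopA, paintB]; simp [splitChapB]
  | cons r rest ih =>
    intro k hk
    have hn : (0 : Int) < ((b0 :: bs).length : Int) := by exact_mod_cast Nat.succ_pos bs.length
    by_cases hc : chapFlagB r
    · -- chapter row: A's new idx ((idx+1)%n) equals B's segment index k % n = ((k+1)-1) % n
      have hidx : PySem.Int.mod ((if k = 0 then -1 else PySem.Int.mod (k - 1) ((b0 :: bs).length : Int)) + 1) ((b0 :: bs).length : Int)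
          = PySem.Int.mod k ((b0 :: bs).length : Int) := by
        by_cases h0 : k = 0
        · simp [h0]
        · rw [if_neg h0]
          rw [PySem.Int.mod_eq_emod_of_pos hn, PySem.Int.mod_eq_emod_of_pos hn,
              PySem.Int.mod_eq_emod_of_pos hn]
          rw [emod_succ_emod]
          norm_num
      rw [tagLoopA, if_pos (by simpa [chapFlagB] using hc)]
      rw [paintB_cons, if_pos hc]
      have hk1 : (0:Int) ≤ k + 1 := by omega
      have := ih (k + 1) hk1
      rw [if_neg (by omega), if_neg (by omega)] at this
      simp only [show (k:Int) + 1 - 1 = k by ring] at this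
      simp only [hidx, this, recWithB]
    · -- non-chapter row: both states unchanged
      rw [tagLoopA, if_neg (by simpa [chapFlagB] using hc)]
      rw [paintB_cons, if_neg hc]
      simp only [ih k hk, recWithB]

-- ===== VERDICT (by name: the statement is the Claim_ definition above) =====
theorem tag_bgs_spec : Claim_equal_tag_bgs := by
  intro rows bgs _ hpre
  unfold Spec_tag_bgs
  obtain ⟨hb, -⟩ := hpre
  match bgs, hb with
  | b0 :: bs, _ =>
    show tag_bgs rows (b0 :: bs) = tag_bgs_alt rows (b0 :: bs)
    unfold tag_bgs tag_bgs_alt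
    have := loop_eq b0 bs (PySem.List.sorted rows (fun x => (PySem.Dict.mk x).getD "id" "")) 0 le_rfl
    simpa using this
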